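-- pv_equiv track=rewrite | github.com/DiscordantST/Codewars5kyu | RecursiveASCIIFractals.py | fractalize
-- ===== SOURCE A (Python) =====
-- def fractalize(seed, i):
--     if i <= 1: return seed
--     star = fractalize(seed, i-1)
--     dot = [row.replace('*','.') for row in star]
--     return [
--         ''.join(rowrow)
--         for row in seed
--         for rowrow in zip(*(star if c == '*' else dot for c in row))
--     ]
-- ===== SOURCE B (Python) =====
-- def expand(pattern, tile):
--     # one expansion level; identical output rows are shared via the cache
--     # (value-identical to building each row fresh, but far lighter in memory)
--     cache = {}
--     dot = []
--     for r in tile: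
--         s = r.replace('*', '.')
--         dot.append(cache.setdefault(s, s))
--     out = []
--     for row in pattern:
--         for rr in zip(*(tile if c == '*' else dot for c in row)):
--             s = ''.join(rr)
--             out.append(cache.setdefault(s, s))
--     return out
--
-- def fractalize(seed, i):
--     if i <= 1:
--         return seed
--     current = seed
--     for _ in range(i - 1):
--         current = expand(seed, current)
--     return current
-- ===== Notes on version B (the rewrite author's own statement) =====
-- stated objective: alternative
-- what changed: Replaces the recursive descent with an explicit bottom-up loop (current = seed, then i-1 times current = expand(seed, current)) whose one-level expansion shares value-identical rows through a setdefault cache instead of allocating each row afresh.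
import Mathlib
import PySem

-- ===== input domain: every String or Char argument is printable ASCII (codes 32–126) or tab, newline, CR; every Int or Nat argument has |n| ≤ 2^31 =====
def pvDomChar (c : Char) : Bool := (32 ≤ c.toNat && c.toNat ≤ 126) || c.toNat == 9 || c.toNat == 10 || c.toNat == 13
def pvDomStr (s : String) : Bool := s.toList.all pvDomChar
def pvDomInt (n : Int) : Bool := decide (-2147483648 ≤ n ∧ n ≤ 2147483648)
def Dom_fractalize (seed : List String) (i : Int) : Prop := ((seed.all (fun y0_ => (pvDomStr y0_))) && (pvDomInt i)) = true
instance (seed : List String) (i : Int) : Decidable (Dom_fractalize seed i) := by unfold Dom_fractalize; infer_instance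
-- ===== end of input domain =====

-- B replaces A's recursive descent with an explicit bottom-up loop applying the one-level
-- expansion i-1 times, and shares value-identical rows through a cache (same return value).


-- ===== PORT A =====
-- hand port of Python's zip(*lists) on lists of strings: rows up to the minimum length
-- (exact: zip stops at the shortest iterable; zip of no iterables is empty)
def pyMinLen (ls : List (List String)) : Nat :=
  match ls with
  | [] => 0
  | x :: xs => xs.foldl (fun m l => min m l.length) x.length

def pyZip (ls : List (List String)) : List (List String) :=
  (List.range (pyMinLen ls)).map (fun j => ls.map (fun l => l.getD j ""))

def fractalize (seed : List String) (i : Int) : List String :=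
  if i ≤ 1 then seed
  else
    let star := fractalize seed (i - 1)
    let dot := star.map (fun row => PySem.Str.replace row "*" ".")
    seed.flatMap (fun row =>
      (pyZip (row.toList.map (fun c => if c = '*' then star else dot))).map
        (fun rr => PySem.Str.join "" rr))
termination_by i.toNat
decreasing_by omega

-- ===== PORT B =====
-- hand port of Python's cache.setdefault(s, s): returns the stored value for key s
-- (inserting s itself if absent) together with the updated dict — exact for dict.setdefault
def uCache (c : PySem.Dict String String) (s : String) :
    PySem.Dict String String × String :=
  match c.get? s with
  | some v => (c, v)
  | none => (c.insert s s, s)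

def expandB (pattern tile : List String) : List String :=
  let p1 := tile.foldl
    (fun (p : PySem.Dict String String × List String) r =>
      let q := uCache p.1 (PySem.Str.replace r "*" ".")
      (q.1, p.2 ++ [q.2]))
    (PySem.Dict.empty, [])
  let dot := p1.2
  let p2 := pattern.foldl
    (fun (p : PySem.Dict String String × List String) row =>
      (pyZip (row.toList.map (fun c => if c = '*' then tile else dot))).foldl
        (fun (p : PySem.Dict String String × List String) rr =>
          let q := uCache p.1 (PySem.Str.join "" rr)
          (q.1, p.2 ++ [q.2]))
        p)
    (p1.1, [])
  p2.2

def fractalize_alt (seed : List String) (i : Int) : List String :=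
  if i ≤ 1 then seed
  else (List.range (i - 1).toNat).foldl (fun cur _ => expandB seed cur) seed

-- ===== PRECONDITION & SPEC =====
-- Pre_ excludes exactly the inputs on which the Python A raises: for large i A's
-- recursive descent exceeds CPython's recursion limit and raises RecursionError before
-- producing any value (regardless of seed); the bound 998 is the default-limit threshold.
def Pre_fractalize (seed : List String) (i : Int) : Prop := i ≤ 998
instance (seed : List String) (i : Int) : Decidable (Pre_fractalize seed i) := by
  unfold Pre_fractalize; infer_instance

def pvWitness_fractalize : List String × Int := (["*.", ".*"], 3)

def Spec_fractalize (seed : List String) (i : Int) (out : List String) : Prop := out = fractalize_alt seed i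
instance (seed : List String) (i : Int) (out : List String) : Decidable (Spec_fractalize seed i out) := by unfold Spec_fractalize; infer_instance

-- ===== CLAIM (what is proved, stated in full; the proofs are below) =====
def Claim_equal_fractalize : Prop := ∀ (seed : List String) (i : Int), Dom_fractalize seed i → Pre_fractalize seed i → Spec_fractalize seed i (fractalize seed i)

-- ===== LEMMAS AND PROOFS =====
-- cache invariant: every stored value is its own key, so setdefault returns its argument
def CInv (c : PySem.Dict String String) : Prop :=
  ∀ k v, c.get? k = some v → v = k

theorem cinv_empty : CInv PySem.Dict.empty := by
  intro k v h; simp [PySem.Dict.get?_empty] at h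

theorem uCache_snd (c : PySem.Dict String String) (s : String) (h : CInv c) :
    (uCache c s).2 = s := by
  unfold uCache
  cases hc : c.get? s with
  | none => rfl
  | some v => exact h s v hc

theorem uCache_inv (c : PySem.Dict String String) (s : String) (h : CInv c) :
    CInv (uCache c s).1 := by
  unfold uCache
  cases hc : c.get? s with
  | none =>
      intro k v hk
      simp only at hk
      rcases eq_or_ne k s with rfl | hne
      · rw [PySem.Dict.get?_insert_self] at hk
        exact (Option.some.inj hk).symm
      · rw [PySem.Dict.get?_insert_of_ne c s hne] at hk
        exact h k v hk
  | some v => exact h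

-- an append-to-accumulator cache fold produces acc ++ map f, and keeps the invariant
theorem foldl_uCache {α : Type} (f : α → String) (xs : List α)
    (c : PySem.Dict String String) (acc : List String) (h : CInv c) :
    (xs.foldl (fun (p : PySem.Dict String String × List String) x =>
        let q := uCache p.1 (f x)
        (q.1, p.2 ++ [q.2])) (c, acc)).2 = acc ++ xs.map f
    ∧ CInv (xs.foldl (fun (p : PySem.Dict String String × List String) x =>
        let q := uCache p.1 (f x)
        (q.1, p.2 ++ [q.2])) (c, acc)).1 := by
  induction xs generalizing c acc with
  | nil => exact ⟨by simp, h⟩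
  | cons x xs ih =>
      simp only [List.foldl_cons, List.map_cons]
      have h2 := uCache_snd c (f x) h
      have h3 := uCache_inv c (f x) h
      have := ih (uCache c (f x)).1 (acc ++ [(uCache c (f x)).2]) h3
      simpa [h2, List.append_assoc] using this

-- the nested row loop produces acc ++ flatMap, threading one cache through
theorem foldl_rows (tile dot : List String) (rows : List String)
    (c : PySem.Dict String String) (acc : List String) (h : CInv c) :
    (rows.foldl (fun (p : PySem.Dict String String × List String) row =>
        (pyZip (row.toList.map (fun ch => if ch = '*' then tile else dot))).foldl
          (fun (p : PySem.Dict String String × List String) rr =>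
            let q := uCache p.1 (PySem.Str.join "" rr)
            (q.1, p.2 ++ [q.2])) p) (c, acc)).2
      = acc ++ rows.flatMap (fun row =>
          (pyZip (row.toList.map (fun ch => if ch = '*' then tile else dot))).map
            (fun rr => PySem.Str.join "" rr)) := by
  induction rows generalizing c acc with
  | nil => simp
  | cons row rows ih =>
      simp only [List.foldl_cons, List.flatMap_cons]
      have hin := foldl_uCache (fun rr => PySem.Str.join "" rr)
        (pyZip (row.toList.map (fun ch => if ch = '*' then tile else dot))) c acc h
      set st := (pyZip (row.toList.map (fun ch => if ch = '*' then tile else dot))).foldl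
          (fun (p : PySem.Dict String String × List String) rr =>
            let q := uCache p.1 (PySem.Str.join "" rr)
            (q.1, p.2 ++ [q.2])) (c, acc) with hst
      have := ih st.1 st.2 hin.2
      rw [← List.append_assoc]
      rw [← hin.1]
      have hpair : st = (st.1, st.2) := rfl
      rw [← hpair] at this
      exact this

-- expandB equals the one-level expansion written as map + flatMap (A's body shape)
theorem expandB_eq (pattern tile : List String) :
    expandB pattern tile =
      pattern.flatMap (fun row =>
        (pyZip (row.toList.map (fun ch => if ch = '*' then tile
            else tile.map (fun r => PySem.Str.replace r "*" ".")))).map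
          (fun rr => PySem.Str.join "" rr)) := by
  unfold expandB
  have h1 := foldl_uCache (fun r => PySem.Str.replace r "*" ".") tile
    PySem.Dict.empty [] cinv_empty
  set p1 := tile.foldl
    (fun (p : PySem.Dict String String × List String) r =>
      let q := uCache p.1 (PySem.Str.replace r "*" ".")
      (q.1, p.2 ++ [q.2])) (PySem.Dict.empty, ([] : List String)) with hp1
  have hdot : p1.2 = tile.map (fun r => PySem.Str.replace r "*" ".") := by
    simpa using h1.1
  have h2 := foldl_rows tile p1.2 pattern p1.1 [] h1.2
  simp only [hdot] at h2 ⊢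
  simpa using h2

theorem fractalize_loop (seed : List String) (n : Nat) :
    fractalize seed ((n : Int) + 1) =
      (List.range n).foldl (fun cur _ => expandB seed cur) seed := by
  induction n with
  | zero => simp [fractalize]
  | succ n ih =>
      rw [fractalize]
      have h1 : ¬ ((n + 1 : Nat) : Int) + 1 ≤ 1 := by omega
      have h2 : ((n + 1 : Nat) : Int) + 1 - 1 = (n : Int) + 1 := by omega
      rw [if_neg h1, h2, ih, List.range_succ, List.foldl_append]
      simp only [List.foldl_cons, List.foldl_nil]
      rw [expandB_eq]

theorem fractalize_eq_alt (seed : List String) (i : Int) :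
    fractalize seed i = fractalize_alt seed i := by
  by_cases h : i ≤ 1
  · rw [fractalize, fractalize_alt, if_pos h, if_pos h]
  · have hi : i = ((i - 1).toNat : Int) + 1 := by omega
    rw [fractalize_alt, if_neg h]
    calc fractalize seed i = fractalize seed (((i - 1).toNat : Int) + 1) := by rw [← hi]
      _ = _ := fractalize_loop seed (i - 1).toNat

-- ===== VERDICT (by name: the statement is the Claim_ definition above) =====
theorem fractalize_spec : Claim_equal_fractalize := by
  intro seed i _ _
  exact fractalize_eq_alt seed i
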